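-- pv_equiv track=rewrite | github.com/Shedarshian/chiharu | chiharu/plugins/mbf.py | parse
-- ===== SOURCE A (Python) =====
-- def pop(stack):
--     if len(stack) == 0:
--         return 0
--     return stack.pop()
--
-- def push(stack, i):
--     stack.append(i)
--
-- def parse(liststring):
--     stack_mid = []
--     stack_big = []
--     map_mid_lr = {}
--     map_mid_rl = {}
--     map_big_lr = {}
--     map_big_rl = {}
--     pos = 0
--     for char in liststring:
--         if char == '[':
--             push(stack_mid, pos)
--         elif char == '{':
--             push(stack_big, pos)
--         elif char == ']':
--             if(len(stack_mid) == 0):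
--                 map_mid_rl[pos] = -1
--             i = pop(stack_mid)
--             map_mid_lr[i] = pos
--             map_mid_rl[pos] = i
--         elif char == '}':
--             if(len(stack_big) == 0):
--                 map_big_rl[pos] = -1
--             i = pop(stack_big)
--             map_big_lr[i] = pos
--             map_big_rl[pos] = i
--         pos += 1
--     if len(stack_mid) != 0:
--         for mid in stack_mid:
--             map_mid_lr[mid] = len(liststring) - 1
--         for big in stack_big:
--             map_big_lr[big] = len(liststring) - 1
--     return map_mid_lr, map_mid_rl, map_big_lr, map_big_rl
-- ===== SOURCE B (Python) =====
-- def parse(liststring):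
--     n = len(liststring)
--
--     def scan(opener, closer):
--         lr, rl, stack = {}, {}, []
--         for pos, ch in enumerate(liststring):
--             if ch == opener:
--                 stack.append(pos)
--             elif ch == closer:
--                 i = stack.pop() if stack else 0
--                 lr[i] = pos
--                 rl[pos] = i
--         return lr, rl, stack
--
--     mid_lr, mid_rl, mid_stack = scan('[', ']')
--     big_lr, big_rl, big_stack = scan('{', '}')
--     if mid_stack:
--         for m in mid_stack:
--             mid_lr[m] = n - 1
--         for b in big_stack:
--             big_lr[b] = n - 1
--     return mid_lr, mid_rl, big_lr, big_rl
-- ===== Notes on version B (the rewrite author's own statement) =====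
-- stated objective: simpler
-- what changed: A's single loop interleaving both bracket kinds is split into one reusable scan helper run as two sequential passes (one for [/], one for {/}), with the empty-pop transient rl[pos]=-1 dropped since it is always immediately overwritten by 0, followed by the same mid-stack-gated end coupling.
import Mathlib
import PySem

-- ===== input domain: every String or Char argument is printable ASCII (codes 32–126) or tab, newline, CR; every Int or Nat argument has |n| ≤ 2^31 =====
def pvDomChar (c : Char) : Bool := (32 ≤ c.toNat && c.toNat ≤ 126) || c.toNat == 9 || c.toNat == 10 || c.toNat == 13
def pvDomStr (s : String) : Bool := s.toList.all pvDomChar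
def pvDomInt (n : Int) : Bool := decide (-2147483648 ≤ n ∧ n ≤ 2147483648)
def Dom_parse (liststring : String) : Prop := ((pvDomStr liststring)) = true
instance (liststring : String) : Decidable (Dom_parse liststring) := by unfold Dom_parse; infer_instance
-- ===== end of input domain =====

-- B replaces A's single interleaved loop by one reusable scan run twice (once for '[',']'
-- and once for '{','}'), then applies the same end coupling; objective: simpler.

-- ===== PORT A =====

-- helper `pop`: returns 0 on an empty stack, else the last element; also returns the new stack
def popA (stack : List Int) : Int × List Int :=
  if stack.length = 0 then (0, stack)
  else (stack.getLastD 0, stack.dropLast)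

structure StA where
  sm : List Int
  sb : List Int
  mlr : PySem.Dict Int Int
  mrl : PySem.Dict Int Int
  blr : PySem.Dict Int Int
  brl : PySem.Dict Int Int
  pos : Int
  deriving Repr

-- one iteration of A's loop body (push = append at the end, pop = from the end)
def stepA (st : StA) (c : Char) : StA :=
  if c = '[' then { st with sm := st.sm ++ [st.pos], pos := st.pos + 1 }
  else if c = '{' then { st with sb := st.sb ++ [st.pos], pos := st.pos + 1 }
  else if c = ']' then
    let mrl0 := if st.sm.length = 0 then st.mrl.insert st.pos (-1) else st.mrl
    let p := popA st.sm
    { st with sm := p.2, mlr := st.mlr.insert p.1 st.pos,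
              mrl := mrl0.insert st.pos p.1, pos := st.pos + 1 }
  else if c = '}' then
    let brl0 := if st.sb.length = 0 then st.brl.insert st.pos (-1) else st.brl
    let p := popA st.sb
    { st with sb := p.2, blr := st.blr.insert p.1 st.pos,
              brl := brl0.insert st.pos p.1, pos := st.pos + 1 }
  else { st with pos := st.pos + 1 }

def parse (liststring : String) : (List (Int × Int)) × (List (Int × Int)) × (List (Int × Int)) × (List (Int × Int)) :=
  let st := liststring.toList.foldl stepA ⟨[], [], .empty, .empty, .empty, .empty, 0⟩
  let n : Int := (liststring.toList.length : Int)
  let fin : PySem.Dict Int Int × PySem.Dict Int Int :=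
    if st.sm.length ≠ 0 then
      (st.sm.foldl (fun d m => d.insert m (n - 1)) st.mlr,
       st.sb.foldl (fun d b => d.insert b (n - 1)) st.blr)
    else (st.mlr, st.blr)
  (fin.1.items, st.mrl.items, fin.2.items, st.brl.items)

-- ===== PORT B =====

-- one iteration of B's scan loop for a fixed opener/closer pair
def stepB (o c : Char) (st : PySem.Dict Int Int × PySem.Dict Int Int × List Int)
    (pc : Int × Char) : PySem.Dict Int Int × PySem.Dict Int Int × List Int :=
  if pc.2 = o then (st.1, st.2.1, st.2.2 ++ [pc.1])
  else if pc.2 = c then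
    let p : Int × List Int := if st.2.2 = [] then (0, []) else (st.2.2.getLastD 0, st.2.2.dropLast)
    (st.1.insert p.1 pc.1, st.2.1.insert pc.1 p.1, p.2)
  else st

-- B's `scan(opener, closer)`
def scanB (liststring : String) (o c : Char) :
    PySem.Dict Int Int × PySem.Dict Int Int × List Int :=
  (PySem.List.enumerate liststring.toList).foldl (stepB o c) (.empty, .empty, [])

def parse_alt (liststring : String) : (List (Int × Int)) × (List (Int × Int)) × (List (Int × Int)) × (List (Int × Int)) :=
  let n : Int := (liststring.toList.length : Int)
  let m := scanB liststring '[' ']'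
  let g := scanB liststring '{' '}'
  if m.2.2 ≠ [] then
    ((m.2.2.foldl (fun d x => d.insert x (n - 1)) m.1).items, m.2.1.items,
     (g.2.2.foldl (fun d x => d.insert x (n - 1)) g.1).items, g.2.1.items)
  else (m.1.items, m.2.1.items, g.1.items, g.2.1.items)

-- ===== PRECONDITION & SPEC =====
def Spec_parse (liststring : String) (out : (List (Int × Int)) × (List (Int × Int)) × (List (Int × Int)) × (List (Int × Int))) : Prop := out = parse_alt liststring
instance (liststring : String) (out : (List (Int × Int)) × (List (Int × Int)) × (List (Int × Int)) × (List (Int × Int))) : Decidable (Spec_parse liststring out) := by unfold Spec_parse; infer_instance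

-- ===== CLAIM (what is proved, stated in full; the proofs are below) =====
def Claim_equal_parse : Prop := ∀ (liststring : String), Dom_parse liststring → Spec_parse liststring (parse liststring)

-- ===== LEMMAS AND PROOFS =====

-- A's interleaved fold decomposes into B's two independent scans.
theorem foldA_split (cs : List Char) (sm sb : List Int)
    (mlr mrl blr brl : PySem.Dict Int Int) (p : Int) :
    cs.foldl stepA ⟨sm, sb, mlr, mrl, blr, brl, p⟩ =
      (let m := (PySem.List.enumerate cs p).foldl (stepB '[' ']') (mlr, mrl, sm)
       let g := (PySem.List.enumerate cs p).foldl (stepB '{' '}') (blr, brl, sb)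
       ⟨m.2.2, g.2.2, m.1, m.2.1, g.1, g.2.1, p + cs.length⟩) := by
  induction cs generalizing sm sb mlr mrl blr brl p with
  | nil => simp [PySem.List.enumerate]
  | cons c cs ih =>
    rw [PySem.List.enumerate_cons]
    simp only [List.foldl_cons]
    by_cases h1 : c = '['
    · simp only [stepA, stepB, h1, reduceIte, List.length_cons]
      rw [ih]; simp; ring
    · by_cases h2 : c = '{'
      · simp only [stepA, stepB, h2, reduceIte, List.length_cons]
        rw [ih]; simp; ring
      · by_cases h3 : c = ']'
        · simp only [stepA, stepB, h3, reduceIte, List.length_cons]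
          cases sm with
          | nil =>
            simp only [popA, List.length_nil, reduceIte]
            rw [ih]
            simp [PySem.Dict.insert_insert_self]; ring
          | cons x xs =>
            simp only [popA, List.length_cons]
            rw [if_neg (by simp), if_neg (by simp)]
            rw [ih]; simp; ring
        · by_cases h4 : c = '}'
          · simp only [stepA, stepB, h4, reduceIte, List.length_cons]
            cases sb with
            | nil =>
              simp only [popA, List.length_nil, reduceIte]
              rw [ih]
              simp [PySem.Dict.insert_insert_self]; ring
            | cons x xs =>
              simp only [popA, List.length_cons]
              rw [if_neg (by simp), if_neg (by simp)]
              rw [ih]; simp; ring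
          · simp only [stepA, stepB, h1, h2, h3, h4, reduceIte, List.length_cons]
            rw [ih]; simp; ring

-- ===== VERDICT (by name: the statement is the Claim_ definition above) =====
theorem parse_spec : Claim_equal_parse := by
  intro s _
  show parse s = parse_alt s
  unfold parse parse_alt scanB
  rw [foldA_split]
  simp only []
  by_cases h : ((PySem.List.enumerate s.toList 0).foldl (stepB '[' ']')
      (.empty, .empty, [])).2.2 = []
  · simp [h]
  · simp [h]
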